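-- pv_equiv track=rewrite | github.com/Serj1c/ya-algos | theory/7-event_sorting.py | mincarsonfullparkinggoodsolution
-- ===== SOURCE A (Python) =====
-- def mincarsonfullparkinggoodsolution(cars, n):
--     events = []
--     for i in range(len(cars)):
--         timein, timeout, placefrom, placeto = cars[i]
--         events.append((timein, 1, placeto-placefrom+1, i))
--         events.append((timeout,-1,placeto-placefrom+1, i))
--     events.sort()
--
--     occupied = 0
--     nowcars = 0
--     mincars = len(cars)+1
--     for i in range(len(events)):
--         if events[i][1] == -1:
--             occupied -= events[i][2]
--             nowcars -= 1
--         elif events[i][1] == 1: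
--             occupied += events[i][2]
--             nowcars += 1
--         if occupied == n and nowcars < mincars:
--             mincars = nowcars
--
--     carnums = set()
--     nowcars = 0
--     for i in range(len(events)):
--         if events[i][1] == -1:
--             occupied -=  events[i][2]
--             nowcars -= 1
--             carnums.remove(events[i][3])
--         elif events[i][1] == 1:
--             occupied += events[i][2]
--             nowcars += 1
--             carnums.add(events[i][3])
--         if occupied == n and nowcars == mincars:
--             return carnums
--     return set()
-- ===== SOURCE B (Python) =====
-- def mincarsonfullparkinggoodsolution(cars, n):
--     events = sorted(
--         (t, typ, pto - pfrom + 1, i)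
--         for i, (tin, tout, pfrom, pto) in enumerate(cars)
--         for t, typ in ((tin, 1), (tout, -1))
--     )
--     occupied = 0
--     nowcars = 0
--     best = len(cars) + 1
--     carnums = set()
--     saved = None
--     for _, typ, size, idx in events:
--         occupied += typ * size
--         nowcars += typ
--         if typ == 1:
--             carnums.add(idx)
--         else:
--             carnums.remove(idx)
--         if occupied == n and nowcars < best:
--             best = nowcars
--             saved = set(carnums)
--     return saved if saved is not None else set()
-- ===== Notes on version B (the rewrite author's own statement) =====
-- stated objective: simpler
-- what changed: B replaces A's two full sweeps over the sorted events (one to find the minimum car count at a full moment, a second re-sweep to re-find the first such moment and return its car set) by a single sweep that keeps the running best count and a saved copy of the current car set at each strict improvement.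
-- outside the precondition, e.g. on mincarsonfullparkinggoodsolution([(-3, -1, 0, -2), (1, 0, -1, 2)], -1): A returns {0}, B raises KeyError
import Mathlib
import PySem

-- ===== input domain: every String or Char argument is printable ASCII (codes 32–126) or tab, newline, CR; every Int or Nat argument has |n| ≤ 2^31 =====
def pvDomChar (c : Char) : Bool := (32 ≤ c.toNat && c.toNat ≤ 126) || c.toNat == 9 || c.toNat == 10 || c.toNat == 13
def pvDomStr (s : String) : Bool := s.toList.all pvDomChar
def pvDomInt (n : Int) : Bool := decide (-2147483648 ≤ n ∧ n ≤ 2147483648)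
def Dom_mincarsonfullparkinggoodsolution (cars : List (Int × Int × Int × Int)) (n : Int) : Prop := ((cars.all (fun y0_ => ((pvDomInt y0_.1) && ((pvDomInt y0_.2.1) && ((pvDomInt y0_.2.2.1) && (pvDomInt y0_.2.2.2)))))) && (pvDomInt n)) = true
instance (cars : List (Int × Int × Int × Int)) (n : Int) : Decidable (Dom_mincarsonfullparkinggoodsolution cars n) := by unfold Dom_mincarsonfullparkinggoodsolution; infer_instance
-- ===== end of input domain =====

-- B replaces A's two full sweeps over the sorted events by a single sweep carrying the running
-- best count and a saved copy of the witnessing car set (objective: simpler, one pass instead of two).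
-- Equivalence is about the RETURN value; neither program mutates its arguments observably
-- (A sorts only its own local events list).

-- shared helper for porting Python's 'events.sort()' on 4-tuples: an injective monotone integer
-- encoding of the tuple, so that Int order = Python's lexicographic tuple order; exact while every
-- component is below 2^63 in absolute value (Dom bounds all inputs by 2^31, sizes by 2^33,
-- indices by the list length).
def pvKey (e : Int × Int × Int × Int) : Int :=
  ((e.1 * 18446744073709551616 + e.2.1) * 18446744073709551616 + e.2.2.1) * 18446744073709551616 + e.2.2.2

-- ===== PORT A =====
def pvEventsA (cars : List (Int × Int × Int × Int)) : List (Int × Int × Int × Int) :=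
  PySem.List.sorted
    ((PySem.List.enumerate cars).foldl
      (fun acc p =>
        acc ++ [(p.2.1, 1, p.2.2.2.2 - p.2.2.2.1 + 1, p.1), (p.2.2.1, -1, p.2.2.2.2 - p.2.2.2.1 + 1, p.1)])
      [])
    pvKey

def pvStep1 (n : Int) (s : Int × Int × Int) (e : Int × Int × Int × Int) : Int × Int × Int :=
  let s1 : Int × Int :=
    if e.2.1 = -1 then (s.1 - e.2.2.1, s.2.1 - 1)
    else if e.2.1 = 1 then (s.1 + e.2.2.1, s.2.1 + 1)
    else (s.1, s.2.1)
  if s1.1 = n ∧ s1.2 < s.2.2 then (s1.1, s1.2, s1.2) else (s1.1, s1.2, s.2.2)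

-- second loop; Python's carnums.remove raises KeyError when the index is absent — Pre_ excludes
-- exactly those inputs, so the total Set.discard is exact on the claimed domain.
def pvScan2 (n mincars : Int) : List (Int × Int × Int × Int) → Int → Int → List Int → List Int
  | [], _, _, _ => []
  | e :: es, occ, now, carnums =>
    if e.2.1 = -1 then
      let occ' := occ - e.2.2.1
      let now' := now - 1
      let cn' := PySem.Set.discard carnums e.2.2.2
      if occ' = n ∧ now' = mincars then cn' else pvScan2 n mincars es occ' now' cn'
    else if e.2.1 = 1 then
      let occ' := occ + e.2.2.1
      let now' := now + 1
      let cn' := PySem.Set.add carnums e.2.2.2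
      if occ' = n ∧ now' = mincars then cn' else pvScan2 n mincars es occ' now' cn'
    else
      if occ = n ∧ now = mincars then carnums else pvScan2 n mincars es occ now carnums

def mincarsonfullparkinggoodsolution (cars : List (Int × Int × Int × Int)) (n : Int) : List Int :=
  let events := pvEventsA cars
  let r1 := events.foldl (pvStep1 n) (0, 0, (cars.length : Int) + 1)
  pvScan2 n r1.2.2 events r1.1 0 []

-- ===== PORT B =====
def pvEventsB (cars : List (Int × Int × Int × Int)) : List (Int × Int × Int × Int) :=
  PySem.List.sorted
    ((PySem.List.enumerate cars).flatMap
      (fun p => [(p.2.1, 1, p.2.2.2.2 - p.2.2.2.1 + 1, p.1), (p.2.2.1, -1, p.2.2.2.2 - p.2.2.2.1 + 1, p.1)]))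
    pvKey

def pvStepB (n : Int) (s : Int × Int × List Int × Int × Option (List Int)) (e : Int × Int × Int × Int) :
    Int × Int × List Int × Int × Option (List Int) :=
  let occ := s.1 + e.2.1 * e.2.2.1
  let now := s.2.1 + e.2.1
  let cn := if e.2.1 = 1 then PySem.Set.add s.2.2.1 e.2.2.2 else PySem.Set.discard s.2.2.1 e.2.2.2
  if occ = n ∧ now < s.2.2.2.1 then (occ, now, cn, now, some cn)
  else (occ, now, cn, s.2.2.2.1, s.2.2.2.2)

def mincarsonfullparkinggoodsolution_alt (cars : List (Int × Int × Int × Int)) (n : Int) : List Int :=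
  let r := (pvEventsB cars).foldl (pvStepB n) (0, 0, [], (cars.length : Int) + 1, none)
  (r.2.2.2.2).getD []

-- ===== PRECONDITION & SPEC =====
-- Pre_ excludes cars with timeout ≤ timein: there the out-event sorts before the in-event and the
-- second sweep's carnums.remove raises KeyError in Python (in A and in B alike) unless an earlier
-- full moment returns first — an accidental early escape of A's re-scan.
def Pre_mincarsonfullparkinggoodsolution (cars : List (Int × Int × Int × Int)) (n : Int) : Prop :=
  ∀ c ∈ cars, c.1 < c.2.1
instance (cars : List (Int × Int × Int × Int)) (n : Int) : Decidable (Pre_mincarsonfullparkinggoodsolution cars n) := by unfold Pre_mincarsonfullparkinggoodsolution; infer_instance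
def pvWitness_mincarsonfullparkinggoodsolution : (List (Int × Int × Int × Int)) × Int := ([(0, 2, 1, 3), (1, 4, 2, 2)], 4)

def Spec_mincarsonfullparkinggoodsolution (cars : List (Int × Int × Int × Int)) (n : Int) (out : List Int) : Prop := out = mincarsonfullparkinggoodsolution_alt cars n
instance (cars : List (Int × Int × Int × Int)) (n : Int) (out : List Int) : Decidable (Spec_mincarsonfullparkinggoodsolution cars n out) := by unfold Spec_mincarsonfullparkinggoodsolution; infer_instance

-- ===== CLAIM (what is proved, stated in full; the proofs are below) =====
def Claim_equal_mincarsonfullparkinggoodsolution : Prop := ∀ (cars : List (Int × Int × Int × Int)) (n : Int), Dom_mincarsonfullparkinggoodsolution cars n → Pre_mincarsonfullparkinggoodsolution cars n → Spec_mincarsonfullparkinggoodsolution cars n (mincarsonfullparkinggoodsolution cars n)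

-- ===== LEMMAS AND PROOFS =====

-- the event update both sweeps perform, in B's arithmetic form, and the list of (nowcars, carnums)
-- snapshots taken at the full moments (occupied = n): the common skeleton of all three loops.
def pvTrace (nn : Int) : List (Int × Int × Int × Int) → Int → Int → List Int → List (Int × List Int)
  | [], _, _, _ => []
  | e :: es, occ, now, cn =>
    let occ' := occ + e.2.1 * e.2.2.1
    let now' := now + e.2.1
    let cn' := if e.2.1 = 1 then PySem.Set.add cn e.2.2.2 else PySem.Set.discard cn e.2.2.2
    (if occ' = nn then [(now', cn')] else []) ++ pvTrace nn es occ' now' cn'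

def pvMinf (q : List (Int × List Int)) (m : Int) : Int :=
  q.foldl (fun m p => if p.1 < m then p.1 else m) m

def pvPick (mc : Int) (q : List (Int × List Int)) : List Int :=
  match q.find? (fun p => p.1 == mc) with
  | some p => p.2
  | none => []

def pvAM (bs : Int × Option (List Int)) (p : Int × List Int) : Int × Option (List Int) :=
  if p.1 < bs.1 then (p.1, some p.2) else bs

def pvPM (es : List (Int × Int × Int × Int)) : Prop := ∀ e ∈ es, e.2.1 = 1 ∨ e.2.1 = -1

lemma pvMinf_le (q : List (Int × List Int)) (m : Int) : pvMinf q m ≤ m := by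
  induction q generalizing m with
  | nil => simp [pvMinf]
  | cons p q ih =>
    simp only [pvMinf, List.foldl_cons] at *
    split_ifs with h
    · exact le_trans (ih _) (le_of_lt h)
    · exact ih m


lemma pvL1 (n : Int) (es : List (Int × Int × Int × Int)) (occ now mc : Int) (cn : List Int)
    (h : pvPM es) :
    es.foldl (pvStep1 n) (occ, now, mc)
      = (occ + (es.map (fun e => e.2.1 * e.2.2.1)).sum,
         now + (es.map (fun e => e.2.1)).sum,
         pvMinf (pvTrace n es occ now cn) mc) := by
  induction es generalizing occ now mc cn with
  | nil => simp [pvMinf, pvTrace]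
  | cons e es ih =>
    have he := h e (List.mem_cons_self ..)
    have h' : pvPM es := fun x hx => h x (List.mem_cons_of_mem _ hx)
    rcases he with he | he
    · simp only [List.foldl_cons, pvStep1, pvTrace, he, List.map_cons, List.sum_cons, one_mul]
      norm_num
      by_cases h1 : occ + e.2.2.1 = n
      · subst h1
        by_cases h2 : now + 1 < mc
        · simp only [h2, and_true, if_pos, reduceIte, true_and, if_true]
          rw [ih _ _ _ (PySem.Set.add cn e.2.2.2) h']
          simp [pvMinf, h2]
          constructor <;> ring
        · simp only [h2, and_false, if_neg, if_false, and_true, true_and, if_true, ite_false]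
          rw [ih _ _ _ (PySem.Set.add cn e.2.2.2) h']
          simp [pvMinf, h2]
          constructor <;> ring
      · simp only [h1, false_and, if_neg, ite_false, if_false]
        rw [ih _ _ _ (PySem.Set.add cn e.2.2.2) h']
        simp [pvMinf, h1]
        constructor <;> ring
    · simp only [List.foldl_cons, pvStep1, pvTrace, he, List.map_cons, List.sum_cons, neg_one_mul,
        ← sub_eq_add_neg]
      norm_num
      by_cases h1 : occ - e.2.2.1 = n
      · by_cases h2 : now ≤ mc
        · simp only [h1, h2, and_self, and_true, true_and, if_true, ite_true]
          rw [ih _ _ _ (PySem.Set.discard cn e.2.2.2) h']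
          simp only [pvMinf, List.foldl_cons, Prod.mk.injEq]
          refine ⟨by linear_combination -h1, by ring, ?_⟩
          have h3 : now - 1 < mc := by omega
          simp [h3]
        · simp only [h1, h2, true_and, and_false, ite_false, if_true, ite_true]
          rw [ih _ _ _ (PySem.Set.discard cn e.2.2.2) h']
          simp only [pvMinf, List.foldl_cons, Prod.mk.injEq]
          refine ⟨by linear_combination -h1, by ring, ?_⟩
          have h3 : ¬ (now - 1 < mc) := by omega
          simp [h3]
      · simp only [h1, false_and, ite_false, List.nil_append]
        rw [ih _ _ _ (PySem.Set.discard cn e.2.2.2) h']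
        simp only [pvMinf, Prod.mk.injEq]
        refine ⟨by ring, by ring, trivial⟩

lemma pvL2 (n mc : Int) (es : List (Int × Int × Int × Int)) (occ now : Int) (cn : List Int)
    (h : pvPM es) :
    pvScan2 n mc es occ now cn = pvPick mc (pvTrace n es occ now cn) := by
  induction es generalizing occ now cn with
  | nil => simp [pvScan2, pvTrace, pvPick]
  | cons e es ih =>
    have he := h e (List.mem_cons_self ..)
    have h' : pvPM es := fun x hx => h x (List.mem_cons_of_mem _ hx)
    rcases he with he | he
    · simp only [pvScan2, pvTrace, he, one_mul]
      norm_num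
      by_cases h1 : occ + e.2.2.1 = n
      · by_cases h2 : now + 1 = mc
        · simp [h1, h2, pvPick, List.find?]
        · simp only [h1, h2, and_true, and_false, true_and, ite_true, ite_false, if_true]
          rw [ih _ _ _ h']
          simp [pvPick, List.find?, h2]
      · simp only [h1, false_and, ite_false, List.nil_append]
        rw [ih _ _ _ h']
    · simp only [pvScan2, pvTrace, he, neg_one_mul, ← sub_eq_add_neg]
      norm_num
      by_cases h1 : occ - e.2.2.1 = n
      · by_cases h2 : now - 1 = mc
        · simp [h1, h2, pvPick, List.find?]
        · simp only [h1, h2, and_true, and_false, true_and, ite_true, ite_false, if_true]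
          rw [ih _ _ _ h']
          simp [pvPick, List.find?, h2]
      · simp only [h1, false_and, ite_false, List.nil_append]
        rw [ih _ _ _ h']

lemma pvL3 (n : Int) (es : List (Int × Int × Int × Int)) (occ now best : Int) (cn : List Int)
    (saved : Option (List Int)) :
    (es.foldl (pvStepB n) (occ, now, cn, best, saved)).2.2.2
      = (pvTrace n es occ now cn).foldl pvAM (best, saved) := by
  induction es generalizing occ now cn best saved with
  | nil => simp [pvTrace]
  | cons e es ih =>
    simp only [List.foldl_cons, pvStepB, pvTrace]
    by_cases h1 : occ + e.2.1 * e.2.2.1 = n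
    · by_cases h2 : now + e.2.1 < best
      · simp [h1, h2, pvAM, ih]
      · simp [h1, h2, pvAM, ih]
    · simp [h1, ih]

lemma pvMinf_cons (p : Int × List Int) (q : List (Int × List Int)) (m : Int) :
    pvMinf (p :: q) m = pvMinf q (if p.1 < m then p.1 else m) := rfl

lemma pvL4 (q : List (Int × List Int)) (best : Int) (saved : Option (List Int)) :
    (q.foldl pvAM (best, saved)).2
      = if pvMinf q best < best then (q.find? (fun p => p.1 == pvMinf q best)).map (·.2) else saved := by
  induction q generalizing best saved with
  | nil => simp [pvMinf]
  | cons p q ih =>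
    rw [List.foldl_cons, pvMinf_cons]
    by_cases hp : p.1 < best
    · rw [if_pos hp]
      show (q.foldl pvAM (pvAM (best, saved) p)).2 = _
      rw [show pvAM (best, saved) p = (p.1, some p.2) from if_pos hp, ih]
      have hM : pvMinf q p.1 ≤ p.1 := pvMinf_le q p.1
      by_cases hq : pvMinf q p.1 < p.1
      · have hlt : pvMinf q p.1 < best := lt_trans hq hp
        have hne : (p.1 == pvMinf q p.1) = false := by simp; omega
        rw [if_pos hq, if_pos hlt]
        simp only [List.find?_cons, hne, cond_false]
      · have heq : pvMinf q p.1 = p.1 := le_antisymm hM (by omega)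
        rw [if_neg hq, heq, if_pos hp]
        simp only [List.find?_cons, beq_self_eq_true, cond_true, Option.map_some]
    · rw [if_neg hp]
      show (q.foldl pvAM (pvAM (best, saved) p)).2 = _
      rw [show pvAM (best, saved) p = (best, saved) from if_neg hp, ih]
      by_cases hq : pvMinf q best < best
      · have hne : (p.1 == pvMinf q best) = false := by simp; omega
        rw [if_pos hq, if_pos hq]
        simp only [List.find?_cons, hne, cond_false]
      · rw [if_neg hq, if_neg hq]

lemma pvL6 (n : Int) (es : List (Int × Int × Int × Int)) (occ now : Int) (cn : List Int)
    (h : pvPM es) :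
    ∀ p ∈ pvTrace n es occ now cn, p.1 ≤ now + (es.countP (fun e => e.2.1 == 1) : Int) := by
  induction es generalizing occ now cn with
  | nil => simp [pvTrace]
  | cons e es ih =>
    have he := h e (List.mem_cons_self ..)
    have h' : pvPM es := fun x hx => h x (List.mem_cons_of_mem _ hx)
    intro p hp
    simp only [pvTrace, List.mem_append] at hp
    have hcnt : (0 : Int) ≤ (es.countP (fun e => e.2.1 == 1) : Int) := by positivity
    rcases hp with hp | hp
    · by_cases hocc : occ + e.2.1 * e.2.2.1 = n
      · simp only [hocc, if_pos, ite_true, List.mem_singleton] at hp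
        subst hp
        rcases he with he | he <;> simp [he, List.countP_cons] <;> push_cast <;> omega
      · simp [hocc] at hp
    · have := ih _ _ _ h' p hp
      rcases he with he | he <;> simp [he, List.countP_cons] at this ⊢ <;> push_cast <;> omega
lemma pvEvents_eq (cars : List (Int × Int × Int × Int)) : pvEventsA cars = pvEventsB cars := by
  unfold pvEventsA pvEventsB
  rw [PySem.List.foldl_append_eq_flatMap]
  rfl

lemma pvBase_count (l : List (Int × Int × Int × Int × Int)) :
    (l.flatMap (fun p => [(p.2.1, (1 : Int), p.2.2.2.2 - p.2.2.2.1 + 1, p.1),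
                          (p.2.2.1, -1, p.2.2.2.2 - p.2.2.2.1 + 1, p.1)])).countP
        (fun e => e.2.1 == 1) = l.length := by
  induction l with
  | nil => rfl
  | cons p l ih => simp [List.countP_append, List.countP_cons, ih]

lemma pvBase_sum (l : List (Int × Int × Int × Int × Int)) :
    ((l.flatMap (fun p => [(p.2.1, (1 : Int), p.2.2.2.2 - p.2.2.2.1 + 1, p.1),
                           (p.2.2.1, -1, p.2.2.2.2 - p.2.2.2.1 + 1, p.1)])).map
        (fun e => e.2.1 * e.2.2.1)).sum = 0 := by
  induction l with
  | nil => rfl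
  | cons p l ih => simp [List.flatMap_cons, ih]

lemma pvEvents_pm (cars : List (Int × Int × Int × Int)) : pvPM (pvEventsB cars) := by
  intro e he
  unfold pvEventsB at he
  rw [PySem.List.mem_sorted] at he
  rw [List.mem_flatMap] at he
  obtain ⟨p, -, hmem⟩ := he
  simp at hmem
  rcases hmem with h | h <;> subst h <;> simp


-- ===== VERDICT (by name: the statement is the Claim_ definition above) =====
theorem mincarsonfullparkinggoodsolution_spec : Claim_equal_mincarsonfullparkinggoodsolution := by
  intro cars n _ _
  unfold Spec_mincarsonfullparkinggoodsolution
  unfold mincarsonfullparkinggoodsolution mincarsonfullparkinggoodsolution_alt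
  rw [pvEvents_eq]
  dsimp only
  set evs := pvEventsB cars with hevs
  have hpm : pvPM evs := pvEvents_pm cars
  have hperm : evs.Perm ((PySem.List.enumerate cars).flatMap
      (fun p => [(p.2.1, (1 : Int), p.2.2.2.2 - p.2.2.2.1 + 1, p.1),
                 (p.2.2.1, -1, p.2.2.2.2 - p.2.2.2.1 + 1, p.1)])) := PySem.List.sorted_perm ..
  have hsum : ((evs.map (fun e => e.2.1 * e.2.2.1)).sum : Int) = 0 := by
    rw [(hperm.map _).sum_eq, pvBase_sum]
  have hcnt : (evs.countP (fun e => e.2.1 == 1)) = cars.length := by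
    rw [hperm.countP_eq, pvBase_count, PySem.List.length_enumerate]
  have hlt : ∀ p ∈ pvTrace n evs 0 0 ([] : List Int), p.1 < (cars.length : Int) + 1 := by
    intro p hp
    have := pvL6 n evs 0 0 [] hpm p hp
    rw [hcnt] at this
    omega
  rw [pvL1 n evs 0 0 ((cars.length : Int) + 1) [] hpm, hsum]
  dsimp only
  norm_num
  rw [pvL2 n _ evs 0 0 [] hpm, pvL3, pvL4]
  set tr := pvTrace n evs 0 0 ([] : List Int) with htr
  set M := pvMinf tr ((cars.length : Int) + 1) with hM
  by_cases hcase : M < (cars.length : Int) + 1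
  · rw [if_pos hcase]
    unfold pvPick
    cases hfind : tr.find? (fun p => p.1 == M) <;> simp [hfind]
  · rw [if_neg hcase]
    unfold pvPick
    have hnone : tr.find? (fun p => p.1 == M) = none := by
      rw [List.find?_eq_none]
      intro p hp
      have := hlt p hp
      simp
      omega
    simp [hnone]
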